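-- pv_equiv track=rewrite | github.com/noetl/noetl | noetl/database/core/runtime/sql.py | sql_split
-- ===== SOURCE A (Python) =====
-- from typing import List
--
-- def sql_split(sql_text: str) -> List[str]:
--     """
--     Split SQL text into individual statements.
--
--     Handles string literals properly to avoid splitting on semicolons
--     inside quoted strings.
--
--     Args:
--         sql_text: SQL text to split
--
--     Returns:
--         List of individual SQL statements
--
--     Example:
--         >>> sql = "SELECT * FROM users; DELETE FROM logs;"
--         >>> sql_split(sql)
--         ['SELECT * FROM users', 'DELETE FROM logs']
--     """
--     statements = []
--     current_statement = []
--     in_string = False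
--     string_char = None
--
--     for char in sql_text:
--         if not in_string and char in ('"', "'"):
--             # Enter string literal and keep the quote
--             in_string = True
--             string_char = char
--             current_statement.append(char)
--         elif in_string and char == string_char:
--             # Exit string literal and keep the quote
--             in_string = False
--             string_char = None
--             current_statement.append(char)
--         elif not in_string and char == ';':
--             # Statement separator found outside strings
--             statement = ''.join(current_statement).strip()
--             if statement:
--                 statements.append(statement)
--             current_statement = []
--         else:
--             current_statement.append(char)
--
--     # Add any remaining statement
--     remaining = ''.join(current_statement).strip()
--     if remaining:
--         statements.append(remaining)
--
--     return statements
-- ===== SOURCE B (Python) =====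
-- from typing import List
--
-- def sql_split(sql_text: str) -> List[str]:
--     """Cursor-and-slice splitter: skips whole quoted literals with str.find and
--     slices statements out of the original text instead of accumulating characters."""
--     statements = []
--     n = len(sql_text)
--     start = 0      # beginning of the current statement
--     i = 0          # scan cursor
--     while i < n:
--         c = sql_text[i]
--         if c == ';':
--             stmt = sql_text[start:i].strip()
--             if stmt:
--                 statements.append(stmt)
--             i += 1
--             start = i
--         elif c == '"' or c == "'":
--             j = sql_text.find(c, i + 1)      # jump past the whole string literal
--             i = n if j < 0 else j + 1
--         else:
--             i += 1
--     stmt = sql_text[start:].strip()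
--     if stmt:
--         statements.append(stmt)
--     return statements
-- ===== Notes on version B (the rewrite author's own statement) =====
-- stated objective: alternative
-- what changed: Replaces A's per-character accumulator state machine (in_string flag, list of chars joined at each cut) by a cursor-and-slice scanner that jumps past whole quoted literals with str.find and slices each statement out of the original text between cut points.
import Mathlib
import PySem

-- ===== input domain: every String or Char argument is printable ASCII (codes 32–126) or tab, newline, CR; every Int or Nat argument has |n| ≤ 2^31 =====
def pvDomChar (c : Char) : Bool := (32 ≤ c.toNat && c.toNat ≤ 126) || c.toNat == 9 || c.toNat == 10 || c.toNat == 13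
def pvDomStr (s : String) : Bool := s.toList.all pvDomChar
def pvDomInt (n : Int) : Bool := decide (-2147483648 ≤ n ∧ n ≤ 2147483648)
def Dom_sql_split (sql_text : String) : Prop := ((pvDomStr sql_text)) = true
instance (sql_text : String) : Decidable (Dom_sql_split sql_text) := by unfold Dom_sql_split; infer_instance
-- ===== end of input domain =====

-- B replaces A's char-by-char accumulator state machine by a cursor that skips whole
-- quoted literals with str.find and slices statements out of the original text (objective: alternative).

-- ===== PORT A =====
-- one step of A's for-loop over the characters; state = (statements, current_statement, in_string, string_char)
def pvStepA (st : List String × List Char × Bool × Option Char) (c : Char) :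
    List String × List Char × Bool × Option Char :=
  match st with
  | (stmts, cur, inS, sc) =>
    if inS = false ∧ (c = '"' ∨ c = '\'') then
      (stmts, cur ++ [c], true, some c)
    else if inS = true ∧ some c = sc then
      (stmts, cur ++ [c], false, none)
    else if inS = false ∧ c = ';' then
      let s := PySem.Chars.strip cur             -- ''.join(current_statement).strip()
      (if s ≠ [] then stmts ++ [String.mk s] else stmts, [], inS, sc)
    else
      (stmts, cur ++ [c], inS, sc)

def sql_split (sql_text : String) : List String :=
  match sql_text.toList.foldl pvStepA ([], [], false, none) with
  | (stmts, cur, _, _) =>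
    let r := PySem.Chars.strip cur               -- ''.join(current_statement).strip()
    if r ≠ [] then stmts ++ [String.mk r] else stmts

-- ===== PORT B =====
-- termination fact: a successful find starting at i+1 lands at index ≥ i+1
lemma pvFindFrom_ge (cs sub : List Char) (i : Nat) (h : i < cs.length)
    (hneg : ¬ PySem.Chars.findFrom cs sub ((i : Int) + 1) < 0) :
    (i : Int) + 1 ≤ PySem.Chars.findFrom cs sub ((i : Int) + 1) := by
  have hcast : ((i : Int) + 1) = ((i + 1 : Nat) : Int) := by push_cast; ring
  rw [hcast] at hneg ⊢
  exact (PySem.Chars.findFrom_natCast_spec cs sub (i + 1) (by omega) (by omega)).1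

-- B's while-loop: `start` = start of the current statement, `i` = scan cursor.
-- sql_text[start:i] with 0 ≤ start ≤ i is exactly (cs.drop start).take (i - start) (PySem.List.slice_natCast).
def pvGoB (cs : List Char) (stmts : List String) (start i : Nat) : List String :=
  if h : i < cs.length then
    let c := cs[i]
    if c = ';' then
      let s := PySem.Chars.strip ((cs.drop start).take (i - start))   -- sql_text[start:i].strip()
      pvGoB cs (if s ≠ [] then stmts ++ [String.mk s] else stmts) (i + 1) (i + 1)
    else if c = '"' ∨ c = '\'' then
      let j := PySem.Chars.findFrom cs [c] ((i : Int) + 1)            -- sql_text.find(c, i + 1)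
      if hj : j < 0 then pvGoB cs stmts start cs.length
      else pvGoB cs stmts start (j.toNat + 1)
    else
      pvGoB cs stmts start (i + 1)
  else
    let s := PySem.Chars.strip (cs.drop start)                        -- sql_text[start:].strip()
    if s ≠ [] then stmts ++ [String.mk s] else stmts
termination_by cs.length - i
decreasing_by
  · omega
  · omega
  · have := pvFindFrom_ge cs [cs[i]] i h hj
    omega
  · omega

def sql_split_alt (sql_text : String) : List String :=
  pvGoB sql_text.toList [] 0 0

-- ===== PRECONDITION & SPEC =====
def Spec_sql_split (sql_text : String) (out : List String) : Prop := out = sql_split_alt sql_text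
instance (sql_text : String) (out : List String) : Decidable (Spec_sql_split sql_text out) := by unfold Spec_sql_split; infer_instance

-- ===== CLAIM (what is proved, stated in full; the proofs are below) =====
def Claim_equal_sql_split : Prop := ∀ (sql_text : String), Dom_sql_split sql_text → Spec_sql_split sql_text (sql_split sql_text)

-- ===== LEMMAS AND PROOFS =====

-- A's epilogue ("add any remaining statement") applied to a fold state
def pvFinA (st : List String × List Char × Bool × Option Char) : List String :=
  match st with
  | (stmts, cur, _, _) =>
    let r := PySem.Chars.strip cur
    if r ≠ [] then stmts ++ [String.mk r] else stmts

lemma pv_sql_split_eq (s : String) :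
    sql_split s = pvFinA (s.toList.foldl pvStepA ([], [], false, none)) := by
  simp [sql_split, pvFinA]

-- while inside a string literal, A just appends every character that is not the closing quote
lemma pv_inside (c : Char) (body : List Char) (hc : c ∉ body) :
    ∀ (stmts : List String) (cur : List Char),
      List.foldl pvStepA (stmts, cur, true, some c) body = (stmts, cur ++ body, true, some c) := by
  induction body with
  | nil => intro stmts cur; simp
  | cons b bs ih =>
    intro stmts cur
    have hbc : b ≠ c := by intro h; exact hc (h ▸ List.mem_cons_self)
    have hbs : c ∉ bs := fun h => hc (List.mem_cons_of_mem _ h)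
    simp only [List.foldl_cons]
    have hstep : pvStepA (stmts, cur, true, some c) b = (stmts, cur ++ [b], true, some c) := by
      simp [pvStepA, hbc]
    rw [hstep, ih hbs]
    simp

-- the closing quote flips the state back out of the string
lemma pv_exit (c : Char) (stmts : List String) (cur : List Char) :
    pvStepA (stmts, cur, true, some c) c = (stmts, cur ++ [c], false, none) := by
  simp [pvStepA]

-- segment algebra: appending the next k scanned characters to the current slice
lemma pv_seg_add (cs : List Char) (start i k : Nat) (h : start ≤ i) :
    (cs.drop start).take (i - start) ++ (cs.drop i).take k = (cs.drop start).take (i - start + k) := by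
  have hd : cs.drop i = (cs.drop start).drop (i - start) := by
    rw [List.drop_drop]; congr 1; omega
  rw [hd, ← List.take_add]

lemma pv_seg_all (cs : List Char) (start i : Nat) (h : start ≤ i) :
    (cs.drop start).take (i - start) ++ cs.drop i = cs.drop start := by
  have hd : cs.drop i = (cs.drop start).drop (i - start) := by
    rw [List.drop_drop]; congr 1; omega
  rw [hd, List.take_append_drop]

lemma pv_take_one (cs : List Char) (i : Nat) (h : i < cs.length) :
    (cs.drop i).take 1 = [cs[i]] := by
  rw [List.drop_eq_getElem_cons h]; rfl

-- the main invariant: A's fold from a clean (outside-string) state at cursor i, with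
-- current_statement holding exactly sql_text[start:i], finishes like B's loop from (start, i)
lemma pv_main (cs : List Char) :
    ∀ (fuel i start : Nat) (stmts : List String),
      cs.length - i ≤ fuel → start ≤ i → i ≤ cs.length →
      pvFinA (List.foldl pvStepA (stmts, (cs.drop start).take (i - start), false, none) (cs.drop i))
        = pvGoB cs stmts start i := by
  intro fuel
  induction fuel with
  | zero =>
    intro i start stmts hfuel hsi hlen
    have hi : i = cs.length := by omega
    subst hi
    rw [pvGoB]
    simp only [lt_irrefl, dite_false]
    rw [List.drop_length, List.foldl_nil]
    have : (cs.drop start).take (cs.length - start) = cs.drop start := by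
      apply List.take_of_length_le; simp
    rw [this]; rfl
  | succ n ih =>
    intro i start stmts hfuel hsi hlen
    by_cases h : i < cs.length
    · have hdrop : cs.drop i = cs[i] :: cs.drop (i + 1) := List.drop_eq_getElem_cons h
      set c := cs[i] with hc
      rw [pvGoB]
      simp only [h, dite_true]
      by_cases hsemi : c = ';'
      · -- statement cut
        have hstep : pvStepA (stmts, (cs.drop start).take (i - start), false, none) c =
            (if PySem.Chars.strip ((cs.drop start).take (i - start)) ≠ [] then
                stmts ++ [String.mk (PySem.Chars.strip ((cs.drop start).take (i - start)))]
              else stmts, [], false, none) := by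
          simp [pvStepA, hsemi]
        rw [hdrop, List.foldl_cons, hstep]
        have hnext := ih (i + 1) (i + 1)
          (if PySem.Chars.strip ((cs.drop start).take (i - start)) ≠ [] then
              stmts ++ [String.mk (PySem.Chars.strip ((cs.drop start).take (i - start)))]
            else stmts)
          (by omega) (by omega) (by omega)
        have hz : (cs.drop (i + 1)).take (i + 1 - (i + 1)) = ([] : List Char) := by simp
        rw [hz] at hnext
        rw [hnext]
        simp only [← hc, hsemi, if_true]
      · by_cases hq : c = '"' ∨ c = '\''
        · -- string literal: A walks it char by char, B jumps with find
          have hstep : pvStepA (stmts, (cs.drop start).take (i - start), false, none) c =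
              (stmts, (cs.drop start).take (i - start) ++ [c], true, some c) := by
            simp [pvStepA, hq]
          rw [hdrop, List.foldl_cons, hstep]
          simp only [← hc, hsemi, if_false, hq, if_true]
          set j := PySem.Chars.findFrom cs [c] ((i : Int) + 1) with hj
          have hcast : ((i : Int) + 1) = ((i + 1 : Nat) : Int) := by push_cast; ring
          by_cases hneg : j < 0
          · -- unterminated literal: everything to the end is part of the current statement
            simp only [hneg, dite_true]
            have hnotin : c ∉ cs.drop (i + 1) := by
              have hm1 : j = -1 := by
                rw [hj, hcast] at hneg ⊢
                by_contra hne
                have := (PySem.Chars.findFrom_natCast_spec cs [c] (i + 1) (by omega) (by omega)).1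
                omega
              have := (PySem.Chars.findFrom_natCast_eq_neg_one_iff cs [c] (i + 1) (by omega)).mp
                (by rw [hj, hcast] at hm1; exact hm1)
              intro hmem
              obtain ⟨l1, l2, hsplit⟩ := List.mem_iff_append.mp hmem
              exact this ⟨l1, l2, by simp [hsplit]⟩
            rw [pv_inside c _ hnotin]
            rw [pvGoB]
            simp only [lt_irrefl, dite_false]
            have hall : (cs.drop start).take (i - start) ++ ([c] ++ cs.drop (i + 1)) = cs.drop start := by
              have h0 := pv_seg_all cs start i hsi
              rw [hdrop] at h0
              simpa using h0
            simp only [pvFinA, List.append_assoc, hall]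
          · -- closing quote at index j
            simp only [hneg, dite_false]
            have hspec := PySem.Chars.findFrom_natCast_spec cs [c] (i + 1) (by omega)
              (by rw [← hcast, ← hj]; omega)
            rw [← hcast, ← hj] at hspec
            obtain ⟨hge, hpre, hmin⟩ := hspec
            set jn := j.toNat with hjn
            have hgen : i + 1 ≤ jn := by omega
            have hjlen : jn < cs.length := by
              rcases hpre with ⟨t, ht⟩
              have : (cs.drop jn).length = cs.length - jn := by simp
              rw [← ht] at this; simp at this; omega
            have hcj : cs[jn] = c := by
              rcases hpre with ⟨t, ht⟩
              rw [List.drop_eq_getElem_cons hjlen] at ht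
              exact (List.cons_eq_cons.mp ht).1.symm
            set m := jn - (i + 1) with hm
            set body := (cs.drop (i + 1)).take m with hbody
            have hnotin : c ∉ body := by
              intro hmem
              obtain ⟨p, hp, hpe⟩ := List.mem_iff_getElem.mp hmem
              have hplen : p < m := by
                have : body.length ≤ m := by rw [hbody]; simp
                omega
              have hpidx : i + 1 + p < cs.length := by omega
              have hval : cs[i + 1 + p]'(by omega) = c := by
                simp only [hbody, List.getElem_take, List.getElem_drop] at hpe
                exact hpe
              apply hmin (i + 1 + p) (by omega) (by omega)
              rw [List.drop_eq_getElem_cons hpidx, hval]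
              exact ⟨_, rfl⟩
            have hdecomp : cs.drop (i + 1) = body ++ c :: cs.drop (jn + 1) := by
              have h1 : body ++ (cs.drop (i + 1)).drop m = cs.drop (i + 1) :=
                List.take_append_drop m _
              have h2 : (cs.drop (i + 1)).drop m = cs.drop jn := by
                rw [List.drop_drop]; congr 1; omega
              rw [← h1, h2, List.drop_eq_getElem_cons hjlen, hcj]
            rw [hdecomp, List.foldl_append, pv_inside c body hnotin, List.foldl_cons, pv_exit]
            have hlb : body.length = m := by
              rw [hbody]; simp; omega
            have e1 : (cs.drop i).take (m + 2) = c :: (body ++ [c]) := by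
              rw [hdrop, hdecomp]
              simp [List.take_succ_cons, List.take_append, hlb]
            have e2 := pv_seg_add cs start i (m + 2) hsi
            rw [e1] at e2
            have hidx : i - start + (m + 2) = jn + 1 - start := by omega
            rw [hidx] at e2
            have hfix : (cs.drop start).take (i - start) ++ [c] ++ body ++ [c]
                = (cs.drop start).take (jn + 1 - start) := by
              rw [← e2]; simp
            rw [hfix]
            exact ih (jn + 1) start stmts (by omega) (by omega) (by omega)
        · -- ordinary character
          have hstep : pvStepA (stmts, (cs.drop start).take (i - start), false, none) c =
              (stmts, (cs.drop start).take (i - start) ++ [c], false, none) := by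
            simp [pvStepA, hq, hsemi]
          rw [hdrop, List.foldl_cons, hstep]
          simp only [← hc, hsemi, if_false, hq]
          have hcur : (cs.drop start).take (i - start) ++ [c]
              = (cs.drop start).take (i + 1 - start) := by
            have := pv_seg_add cs start i 1 hsi
            rw [pv_take_one cs i h] at this
            rw [← hc] at this
            rw [this]; congr 1; omega
          rw [hcur]
          exact ih (i + 1) start stmts (by omega) (by omega) (by omega)
    · have hi : i = cs.length := by omega
      subst hi
      rw [pvGoB]
      simp only [lt_irrefl, dite_false]
      rw [List.drop_length, List.foldl_nil]
      have : (cs.drop start).take (cs.length - start) = cs.drop start := by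
        apply List.take_of_length_le; simp
      rw [this]; rfl

-- ===== VERDICT (by name: the statement is the Claim_ definition above) =====
theorem sql_split_spec : Claim_equal_sql_split := by
  intro s _
  unfold Spec_sql_split sql_split_alt
  rw [pv_sql_split_eq]
  have := pv_main s.toList s.toList.length 0 0 [] (by omega) (by omega) (by omega)
  simpa using this
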